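-- pv_equiv track=rewrite | github.com/alexmercel/IoT-Mqtt-Based-garment-production-dashboard | flask-dashboard.py | calc_items_in_stage
-- ===== SOURCE A (Python) =====
-- def calc_items_in_stage(messages,linecap):
--     items_stage_wise=[0,0,0]
--     for i in messages:
--         if i['stage_status']==1:
--             items_stage_wise[0]+=1
--         elif i['stage_status']==2:
--             items_stage_wise[1]+=1
--         elif i['stage_status']==3:
--             items_stage_wise[2]+=1
--
--     return (items_stage_wise)
-- ===== SOURCE B (Python) =====
-- def calc_items_in_stage(messages, linecap):
--     # Three independent counting passes, one per stage, instead of one branching loop.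
--     return [sum(1 for i in messages if i['stage_status'] == s) for s in (1, 2, 3)]
-- ===== Notes on version B (the rewrite author's own statement) =====
-- stated objective: idiomatic
-- what changed: Replaced the single pass that branches on stage_status and mutates a three-slot accumulator by three independent counting scans (one comprehension per stage).
import Mathlib
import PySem

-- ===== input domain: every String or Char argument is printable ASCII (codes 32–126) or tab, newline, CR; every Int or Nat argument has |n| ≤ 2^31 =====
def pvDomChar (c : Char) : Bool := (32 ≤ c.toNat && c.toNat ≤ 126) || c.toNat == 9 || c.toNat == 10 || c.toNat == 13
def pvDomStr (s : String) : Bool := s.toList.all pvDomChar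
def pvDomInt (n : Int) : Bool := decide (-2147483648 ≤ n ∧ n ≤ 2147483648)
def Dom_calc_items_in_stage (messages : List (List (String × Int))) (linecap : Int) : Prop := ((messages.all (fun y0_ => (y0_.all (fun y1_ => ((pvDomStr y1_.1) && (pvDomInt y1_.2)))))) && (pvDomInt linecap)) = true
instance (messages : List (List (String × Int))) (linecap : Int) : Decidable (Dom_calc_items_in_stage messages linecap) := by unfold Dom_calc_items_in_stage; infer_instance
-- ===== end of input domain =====

-- B replaces A's single branching pass over a mutated 3-slot list by three independent
-- counting scans, one per stage (objective: idiomatic); same O(n) cost.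

-- shared helper: Python's i['stage_status'] lookup (first match; none = KeyError)
def pvGetSS (i : List (String × Int)) : Option Int :=
  (PySem.Dict.mk i).get? "stage_status"

-- ===== PORT A =====
-- one step of A's loop body: branch on stage_status and bump the matching slot
-- (index assignment items_stage_wise[k] += 1 on the always-3-element list; indices 0,1,2
-- are always in range, so List.set/getD is exact here)
def pvStepA (acc : List Int) (i : List (String × Int)) : List Int :=
  if pvGetSS i == some 1 then acc.set 0 (acc.getD 0 0 + 1)
  else if pvGetSS i == some 2 then acc.set 1 (acc.getD 1 0 + 1)
  else if pvGetSS i == some 3 then acc.set 2 (acc.getD 2 0 + 1)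
  else acc

def calc_items_in_stage (messages : List (List (String × Int))) (linecap : Int) : List Int :=
  messages.foldl pvStepA [0, 0, 0]

-- ===== PORT B =====
def calc_items_in_stage_alt (messages : List (List (String × Int))) (linecap : Int) : List Int :=
  ([1, 2, 3] : List Int).map
    (fun s => ((messages.filter (fun i => pvGetSS i == some s)).length : Int))

-- ===== PRECONDITION & SPEC =====
-- Pre_ excludes messages lacking the 'stage_status' key, on which both Pythons raise KeyError.
def Pre_calc_items_in_stage (messages : List (List (String × Int))) (linecap : Int) : Prop :=
  messages.all (fun i => (PySem.Dict.mk i).contains "stage_status") = true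
instance (messages : List (List (String × Int))) (linecap : Int) : Decidable (Pre_calc_items_in_stage messages linecap) := by unfold Pre_calc_items_in_stage; infer_instance

def pvWitness_calc_items_in_stage : (List (List (String × Int))) × Int :=
  ([[("stage_status", 1)], [("stage_status", 3)], [("stage_status", 1)], [("stage_status", 7)]], 10)

def Spec_calc_items_in_stage (messages : List (List (String × Int))) (linecap : Int) (out : List Int) : Prop := out = calc_items_in_stage_alt messages linecap
instance (messages : List (List (String × Int))) (linecap : Int) (out : List Int) : Decidable (Spec_calc_items_in_stage messages linecap out) := by unfold Spec_calc_items_in_stage; infer_instance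

-- ===== CLAIM (what is proved, stated in full; the proofs are below) =====
def Claim_equal_calc_items_in_stage : Prop := ∀ (messages : List (List (String × Int))) (linecap : Int), Dom_calc_items_in_stage messages linecap → Pre_calc_items_in_stage messages linecap → Spec_calc_items_in_stage messages linecap (calc_items_in_stage messages linecap)

-- ===== LEMMAS AND PROOFS =====

-- invariant of A's fold: starting from [a,b,c] it adds the three per-stage counts
lemma pvFoldA (ms : List (List (String × Int))) : ∀ a b c : Int,
    ms.foldl pvStepA [a, b, c] =
      [a + ((ms.filter (fun i => pvGetSS i == some 1)).length : Int),
       b + ((ms.filter (fun i => pvGetSS i == some 2)).length : Int),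
       c + ((ms.filter (fun i => pvGetSS i == some 3)).length : Int)] := by
  induction ms with
  | nil => intro a b c; simp
  | cons i ms ih =>
    intro a b c
    by_cases h1 : pvGetSS i = some 1
    · have hs : pvStepA [a, b, c] i = [a + 1, b, c] := by simp [pvStepA, h1]
      rw [List.foldl_cons, hs, ih]
      simp [List.filter_cons, h1]
      omega
    · by_cases h2 : pvGetSS i = some 2
      · have hs : pvStepA [a, b, c] i = [a, b + 1, c] := by simp [pvStepA, h1, h2]
        rw [List.foldl_cons, hs, ih]
        simp [List.filter_cons, h1, h2]
        omega
      · by_cases h3 : pvGetSS i = some 3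
        · have hs : pvStepA [a, b, c] i = [a, b, c + 1] := by simp [pvStepA, h1, h2, h3]
          rw [List.foldl_cons, hs, ih]
          simp [List.filter_cons, h1, h2, h3]
          omega
        · have hs : pvStepA [a, b, c] i = [a, b, c] := by simp [pvStepA, h1, h2, h3]
          rw [List.foldl_cons, hs, ih]
          simp [List.filter_cons, h1, h2, h3]

-- ===== VERDICT (by name: the statement is the Claim_ definition above) =====
theorem calc_items_in_stage_spec : Claim_equal_calc_items_in_stage := by
  intro messages linecap _ _
  unfold Spec_calc_items_in_stage calc_items_in_stage calc_items_in_stage_alt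
  rw [pvFoldA]
  simp
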